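-- pv_equiv track=rewrite | github.com/HYEONAH-SONG/Algorithms | 2021_카카오인턴/P_1.py | solution
-- ===== SOURCE A (Python) =====
-- def solution(s):
--     answer = []
--     # 답으로 출력되는 문자열
--
--     alpha = {"zero": 0, "one": 1, "two": 2, "three": 3, "four": 4, "five": 5, "six": 6, "seven": 7, "eight": 8,
--              "nine": 9}
--     # 0~9까지 딕셔너리 매핑
--     word = ""
--
--     for i in s:
--         word += i
--         for key in alpha:
--             if key in word: # alphabet 이 존재하는 경우
--                 answer.append(str(alpha[key]))
--                 word = ""
--             elif str(alpha[key]) in word: # 숫자가 존재하는 경우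
--                 answer.append(str(alpha[key]))
--                 word = ""
--             else: # 아무것도 존재하지 않는 경우
--                 continue
--     answer_ = int("".join(answer))
--     return answer_
-- ===== SOURCE B (Python) =====
-- def solution(s):
--     # single left-to-right tokenizer: digits pass through, number words match as
--     # prefixes at the current position, anything else is skipped one char at a time
--     words = ["zero", "one", "two", "three", "four", "five", "six", "seven", "eight", "nine"]
--     digits = []
--     i = 0
--     n = len(s)
--     while i < n:
--         c = s[i]
--         if "0" <= c <= "9":
--             digits.append(c)
--             i += 1
--             continue
--         for d in range(10):
--             w = words[d]
--             if s.startswith(w, i):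
--                 digits.append(str(d))
--                 i += len(w)
--                 break
--         else:
--             i += 1
--     return int("".join(digits))
-- ===== Notes on version B (the rewrite author's own statement) =====
-- stated objective: alternative
-- what changed: A grows a buffer and rescans it for all ten words (and ten digit strings) at every character; B is a single left-to-right tokenizer that matches each word once as a prefix at the current position and skips unmatched characters, so nothing is ever rescanned.
import Mathlib
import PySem

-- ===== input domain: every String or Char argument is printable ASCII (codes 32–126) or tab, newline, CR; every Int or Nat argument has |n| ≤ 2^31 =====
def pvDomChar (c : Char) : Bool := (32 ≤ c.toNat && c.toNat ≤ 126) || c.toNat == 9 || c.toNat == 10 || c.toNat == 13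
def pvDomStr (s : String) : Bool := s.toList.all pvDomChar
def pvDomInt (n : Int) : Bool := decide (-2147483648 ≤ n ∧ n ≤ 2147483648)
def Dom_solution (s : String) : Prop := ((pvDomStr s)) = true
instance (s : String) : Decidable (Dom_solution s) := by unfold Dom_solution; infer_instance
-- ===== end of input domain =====

-- B replaces A's growing-buffer substring rescans by a single left-to-right prefix-matching
-- tokenizer (objective: alternative — one pass over the string, nothing is rescanned).
-- Python strings are handled as their char lists (PySem.Chars).

-- ===== PORT A =====
-- the dict literal `alpha`, as an association list in insertion order (keys are distinct,
-- so `alpha[key]` while iterating over the keys is exactly the paired value)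
def alphaA : List (List Char × Int) :=
  [(['z','e','r','o'], 0), (['o','n','e'], 1), (['t','w','o'], 2), (['t','h','r','e','e'], 3),
   (['f','o','u','r'], 4), (['f','i','v','e'], 5), (['s','i','x'], 6), (['s','e','v','e','n'], 7),
   (['e','i','g','h','t'], 8), (['n','i','n','e'], 9)]

-- body of `for key in alpha:` — state is (answer, word); `str(alpha[key])` is PySem.Int.toChars
def stepKeyA (st : List (List Char) × List Char) (kv : List Char × Int) :
    List (List Char) × List Char :=
  if PySem.Chars.isIn kv.1 st.2 then (st.1 ++ [PySem.Int.toChars kv.2], [])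
  else if PySem.Chars.isIn (PySem.Int.toChars kv.2) st.2 then (st.1 ++ [PySem.Int.toChars kv.2], [])
  else (st.1, st.2)

-- body of `for i in s:` — `word += i` then the inner loop over the dict keys
def stepCharA (st : List (List Char) × List Char) (c : Char) : List (List Char) × List Char :=
  alphaA.foldl stepKeyA (st.1, st.2 ++ [c])

-- `int("".join(answer))`; int(...) raises ValueError exactly where ofChars? is none,
-- excluded by Pre_solution (the .getD 0 is never the returned value on Pre_)
def solution (s : String) : Int :=
  (PySem.Int.ofChars? (PySem.Chars.join [] (s.toList.foldl stepCharA ([], [])).1)).getD 0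

-- ===== PORT B =====
-- the literal `pairs` list of Source B; the 1-character strings "0".."9" are ported as Char
def pairsB : List (Char × List Char) :=
  [('0', ['z','e','r','o']), ('1', ['o','n','e']), ('2', ['t','w','o']), ('3', ['t','h','r','e','e']),
   ('4', ['f','o','u','r']), ('5', ['f','i','v','e']), ('6', ['s','i','x']), ('7', ['s','e','v','e','n']),
   ('8', ['e','i','g','h','t']), ('9', ['n','i','n','e'])]

-- used by scanB's termination proof: every word of pairsB is nonempty
theorem pairsB_word_ne_nil : ∀ p ∈ pairsB, p.2 ≠ [] := by
  have h : pairsB.all (fun p => !(decide (p.2 = []))) = true := by rfl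
  simp only [List.all_eq_true, Bool.not_eq_true', decide_eq_false_iff_not] at h
  exact h

-- the `while i < n` loop of Source B, on the list of still-unread characters
-- (`s.startswith(w, i)` is a prefix test at the current position, `i += len(w)` is drop)
def scanB (l : List Char) : List Char :=
  match l with
  | [] => []
  | c :: rest =>
    if ('0' ≤ c && c ≤ '9') then c :: scanB rest
    else
      match h : pairsB.find? (fun p => PySem.Chars.startswith (c :: rest) p.2) with
      | some p => p.1 :: scanB ((c :: rest).drop p.2.length)
      | none => scanB rest
termination_by l.length
decreasing_by
  · simp
  · have hmem := List.mem_of_find?_eq_some h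
    have hne := pairsB_word_ne_nil p hmem
    have : 1 ≤ p.2.length := by
      cases hp : p.2 with
      | nil => exact absurd hp hne
      | cons a t => simp
    simp; omega
  · simp

-- `int("".join(digits))` — digits is a list of single characters
def solution_alt (s : String) : Int :=
  (PySem.Int.ofChars? (scanB s.toList)).getD 0

-- ===== PRECONDITION & SPEC =====
-- Pre_ excludes exactly the inputs where A raises ValueError (strings containing no digit
-- character and none of the ten number words); B raises the same ValueError there.
def Pre_solution (s : String) : Prop :=
  (s.toList.any (fun c => '0' ≤ c && c ≤ '9')
    || [(['z','e','r','o'] : List Char), ['o','n','e'], ['t','w','o'], ['t','h','r','e','e'],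
        ['f','o','u','r'], ['f','i','v','e'], ['s','i','x'], ['s','e','v','e','n'],
        ['e','i','g','h','t'], ['n','i','n','e']].any
         (fun w => PySem.Chars.isIn w s.toList)) = true
instance (s : String) : Decidable (Pre_solution s) := by unfold Pre_solution; infer_instance

def pvWitness_solution : String := "one2three"

def Spec_solution (s : String) (out : Int) : Prop := out = solution_alt s
instance (s : String) (out : Int) : Decidable (Spec_solution s out) := by unfold Spec_solution; infer_instance

-- ===== CLAIM (what is proved, stated in full; the proofs are below) =====
def Claim_equal_solution : Prop := ∀ (s : String), Dom_solution s → Pre_solution s → Spec_solution s (solution s)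

-- ===== LEMMAS AND PROOFS =====

-- the predicate of A's inner loop: does key kv fire on buffer w?
def matchP (w : List Char) (kv : List Char × Int) : Bool :=
  PySem.Chars.isIn kv.1 w || PySem.Chars.isIn (PySem.Int.toChars kv.2) w

-- first key of the dict that fires on buffer w (A appends its digit and clears the buffer)
def findA (w : List Char) : Option (List Char × Int) := alphaA.find? (matchP w)

-- A's scan, extracted: buffer b, remaining characters; returns the appended digit strings
def scanA : List Char → List Char → List (List Char)
  | _, [] => []
  | b, c :: rest =>
    match findA (b ++ [c]) with
    | some kv => PySem.Int.toChars kv.2 :: scanA [] rest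
    | none => scanA (b ++ [c]) rest

-- buffer invariant: no key fires on b
def OK (b : List Char) : Prop := ∀ kv ∈ alphaA, matchP b kv = false

-- ---- finite facts about the ten words (decidable) ----
theorem alphaA_ne_nil : ∀ kv ∈ alphaA, kv.1 ≠ [] ∧ PySem.Int.toChars kv.2 ≠ [] := by
  have h : alphaA.all (fun kv => !(decide (kv.1 = [])) && !(decide (PySem.Int.toChars kv.2 = []))) = true := by rfl
  simp only [List.all_eq_true, Bool.and_eq_true, Bool.not_eq_true', decide_eq_false_iff_not] at h
  exact h

theorem pairsB_no_digit : ∀ p ∈ pairsB, ∀ ch ∈ p.2, ('0' ≤ ch && ch ≤ '9') = false := by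
  have h : pairsB.all (fun p => p.2.all (fun ch => !('0' ≤ ch && ch ≤ '9'))) = true := by rfl
  simp only [List.all_eq_true, Bool.not_eq_true'] at h
  exact h

theorem alphaA_no_digit : ∀ kv ∈ alphaA, ∀ ch ∈ kv.1, ('0' ≤ ch && ch ≤ '9') = false := by
  have h : alphaA.all (fun kv => kv.1.all (fun ch => !('0' ≤ ch && ch ≤ '9'))) = true := by rfl
  simp only [List.all_eq_true, Bool.not_eq_true'] at h
  exact h

theorem pairsB_key_digit : ∀ p ∈ pairsB, ('0' ≤ p.1 && p.1 ≤ '9') = true := by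
  have h : pairsB.all (fun p => ('0' ≤ p.1 && p.1 ≤ '9')) = true := by rfl
  simp only [List.all_eq_true] at h
  exact h

theorem corrAB : ∀ kv ∈ alphaA, ∃ p, p ∈ pairsB ∧ p.2 = kv.1 ∧ PySem.Int.toChars kv.2 = [p.1] := by
  have h : alphaA.all (fun kv => pairsB.any
      (fun p => decide (p.2 = kv.1 ∧ PySem.Int.toChars kv.2 = [p.1]))) = true := by rfl
  simp only [List.all_eq_true, List.any_eq_true, decide_eq_true_eq] at h
  intro kv hkv
  obtain ⟨p, hp, h1, h2⟩ := h kv hkv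
  exact ⟨p, hp, h1, h2⟩

theorem corrBA : ∀ p ∈ pairsB, ∃ kv, kv ∈ alphaA ∧ kv.1 = p.2 ∧ PySem.Int.toChars kv.2 = [p.1] := by
  have h : pairsB.all (fun p => alphaA.any
      (fun kv => decide (kv.1 = p.2 ∧ PySem.Int.toChars kv.2 = [p.1]))) = true := by rfl
  simp only [List.all_eq_true, List.any_eq_true, decide_eq_true_eq] at h
  intro p hp
  obtain ⟨kv, hkv, h1, h2⟩ := h p hp
  exact ⟨kv, hkv, h1, h2⟩

theorem no_word_infix : ∀ p ∈ pairsB, ∀ q ∈ pairsB, p.2 <:+: q.2 → p = q := by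
  have h : pairsB.all (fun p => pairsB.all
      (fun q => !(decide (p.2 <:+: q.2)) || decide (p = q))) = true := by rfl
  simp only [List.all_eq_true, Bool.or_eq_true, Bool.not_eq_true', decide_eq_true_eq,
    decide_eq_false_iff_not] at h
  intro p hp q hq hinf
  rcases h p hp q hq with h' | h'
  · exact absurd hinf h'
  · exact h'

theorem digit_has_key :
    ∀ c : Char, ('0' ≤ c && c ≤ '9') = true → ∃ kv ∈ alphaA, PySem.Int.toChars kv.2 = [c] := by
  intro c h
  have hb : 48 ≤ c.toNat ∧ c.toNat ≤ 57 := by simpa using h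
  have h10 : c.toNat = 48 ∨ c.toNat = 49 ∨ c.toNat = 50 ∨ c.toNat = 51 ∨ c.toNat = 52 ∨
      c.toNat = 53 ∨ c.toNat = 54 ∨ c.toNat = 55 ∨ c.toNat = 56 ∨ c.toNat = 57 := by omega
  have hofn := Char.ofNat_toNat c
  rcases h10 with h'|h'|h'|h'|h'|h'|h'|h'|h'|h' <;> rw [h'] at hofn <;> rw [← hofn]
  · exact ⟨(['z','e','r','o'], 0), by simp [alphaA], rfl⟩
  · exact ⟨(['o','n','e'], 1), by simp [alphaA], rfl⟩
  · exact ⟨(['t','w','o'], 2), by simp [alphaA], rfl⟩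
  · exact ⟨(['t','h','r','e','e'], 3), by simp [alphaA], rfl⟩
  · exact ⟨(['f','o','u','r'], 4), by simp [alphaA], rfl⟩
  · exact ⟨(['f','i','v','e'], 5), by simp [alphaA], rfl⟩
  · exact ⟨(['s','i','x'], 6), by simp [alphaA], rfl⟩
  · exact ⟨(['s','e','v','e','n'], 7), by simp [alphaA], rfl⟩
  · exact ⟨(['e','i','g','h','t'], 8), by simp [alphaA], rfl⟩
  · exact ⟨(['n','i','n','e'], 9), by simp [alphaA], rfl⟩

-- ---- generic list lemmas ----
theorem find?_eq_some_of_unique {α : Type} (l : List α) (p : α → Bool) (x : α)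
    (hmem : x ∈ l) (hx : p x = true) (hu : ∀ y ∈ l, p y = true → y = x) :
    l.find? p = some x := by
  induction l with
  | nil => cases hmem
  | cons a t ih =>
    by_cases ha : p a = true
    · rw [List.find?_cons_of_pos ha, hu a List.mem_cons_self ha]
    · rw [List.find?_cons_of_neg (by simpa using ha)]
      have hmem' : x ∈ t := by
        rcases List.mem_cons.mp hmem with rfl | hm
        · exact absurd hx ha
        · exact hm
      exact ih hmem' (fun y hy => hu y (List.mem_cons_of_mem _ hy))

theorem infix_snoc {α : Type} {x b : List α} {c : α}
    (h : x <:+: b ++ [c]) (hn : ¬ x <:+: b) : x <:+ b ++ [c] := by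
  obtain ⟨s, t, hst⟩ := h
  rcases List.eq_nil_or_concat t with rfl | ⟨t', x', rfl⟩
  · exact ⟨s, by simpa using hst⟩
  · exfalso
    apply hn
    have h2 : (s ++ x ++ t') ++ [x'] = b ++ [c] := by
      simpa [List.append_assoc] using hst
    have h3 := (List.append_inj' h2 rfl).1
    exact ⟨s, t', by simpa [List.append_assoc] using h3⟩

theorem prefix_dropLast {α : Type} {p u : List α} (h : p <+: u) (hl : p.length < u.length) :
    p <+: u.dropLast := by
  obtain ⟨r, rfl⟩ := h
  have hr : r ≠ [] := by
    intro hr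
    subst hr
    simp at hl
  rw [List.dropLast_append_of_ne_nil hr]
  exact ⟨r.dropLast, rfl⟩

theorem suffix_dropLast {α : Type} {u v : List α} (h : u <:+ v) : u.dropLast <:+ v.dropLast := by
  obtain ⟨q, rfl⟩ := h
  rcases eq_or_ne u [] with rfl | hu
  · simp
  · rw [List.dropLast_append_of_ne_nil hu]
    exact ⟨q, rfl⟩

-- a nonempty suffix of b ++ [c] contains c
theorem mem_last_of_suffix_snoc {α : Type} {u b : List α} {c : α}
    (h : u <:+ b ++ [c]) (hu : u ≠ []) : c ∈ u := by
  obtain ⟨q, hq⟩ := h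
  rcases List.eq_nil_or_concat u with rfl | ⟨u', y, rfl⟩
  · exact absurd rfl hu
  · have h2 : (q ++ u') ++ [y] = b ++ [c] := by simpa [List.append_assoc] using hq
    have h3 := (List.append_inj' h2 rfl).2
    simp at h3
    simp [h3]

-- ---- A's loops compute scanA ----
theorem foldKey_nil_word (ks : List (List Char × Int))
    (hk : ∀ kv ∈ ks, kv.1 ≠ [] ∧ PySem.Int.toChars kv.2 ≠ []) (ans : List (List Char)) :
    ks.foldl stepKeyA (ans, []) = (ans, []) := by
  induction ks with
  | nil => rfl
  | cons kv t ih =>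
    obtain ⟨h1, h2⟩ := hk kv List.mem_cons_self
    have e1 : PySem.Chars.isIn kv.1 [] = false :=
      (PySem.Chars.isIn_eq_false_iff _ _).mpr (fun hx => h1 (List.infix_nil.mp hx))
    have e2 : PySem.Chars.isIn (PySem.Int.toChars kv.2) [] = false :=
      (PySem.Chars.isIn_eq_false_iff _ _).mpr (fun hx => h2 (List.infix_nil.mp hx))
    rw [List.foldl_cons]
    have : stepKeyA (ans, []) kv = (ans, []) := by simp [stepKeyA, e1, e2]
    rw [this]
    exact ih (fun kv' h' => hk kv' (List.mem_cons_of_mem _ h'))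

theorem foldKey_eq_find (ks : List (List Char × Int))
    (hk : ∀ kv ∈ ks, kv.1 ≠ [] ∧ PySem.Int.toChars kv.2 ≠ [])
    (ans : List (List Char)) (w : List Char) :
    ks.foldl stepKeyA (ans, w) =
      match ks.find? (matchP w) with
      | some kv => (ans ++ [PySem.Int.toChars kv.2], [])
      | none => (ans, w) := by
  induction ks with
  | nil => rfl
  | cons kv t ih =>
    cases hm : matchP w kv with
    | false =>
      obtain ⟨e1, e2⟩ := Bool.or_eq_false_iff.mp hm
      rw [List.foldl_cons, List.find?_cons_of_neg (by simp [hm])]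
      have : stepKeyA (ans, w) kv = (ans, w) := by simp [stepKeyA, e1, e2]
      rw [this]
      exact ih (fun kv' h' => hk kv' (List.mem_cons_of_mem _ h'))
    | true =>
      rw [List.foldl_cons, List.find?_cons_of_pos hm]
      have : stepKeyA (ans, w) kv = (ans ++ [PySem.Int.toChars kv.2], []) := by
        rcases Bool.or_eq_true_iff.mp hm with e | e
        · simp [stepKeyA, e]
        · by_cases e1 : PySem.Chars.isIn kv.1 w = true
          · simp [stepKeyA, e1]
          · simp [stepKeyA, e1, e]
      rw [this]
      exact foldKey_nil_word t (fun kv' h' => hk kv' (List.mem_cons_of_mem _ h')) _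

theorem foldChar_eq_scanA (l : List Char) (ans : List (List Char)) (b : List Char) :
    (l.foldl stepCharA (ans, b)).1 = ans ++ scanA b l := by
  induction l generalizing ans b with
  | nil => simp [scanA]
  | cons c rest ih =>
    rw [List.foldl_cons]
    have hstep : stepCharA (ans, b) c = alphaA.foldl stepKeyA (ans, b ++ [c]) := rfl
    rw [hstep, foldKey_eq_find alphaA alphaA_ne_nil]
    cases hf : findA (b ++ [c]) with
    | some kv =>
      have hf' : alphaA.find? (matchP (b ++ [c])) = some kv := hf
      rw [hf']
      rw [ih]
      simp [scanA, hf]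
    | none =>
      have hf' : alphaA.find? (matchP (b ++ [c])) = none := hf
      rw [hf']
      rw [ih]
      simp [scanA, hf]

-- ---- buffer facts ----
theorem OK_nil : OK [] := by
  intro kv hkv
  obtain ⟨h1, h2⟩ := alphaA_ne_nil kv hkv
  have e1 : PySem.Chars.isIn kv.1 [] = false :=
    (PySem.Chars.isIn_eq_false_iff _ _).mpr (fun hx => h1 (List.infix_nil.mp hx))
  have e2 : PySem.Chars.isIn (PySem.Int.toChars kv.2) [] = false :=
    (PySem.Chars.isIn_eq_false_iff _ _).mpr (fun hx => h2 (List.infix_nil.mp hx))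
  simp [matchP, e1, e2]

theorem OK_no_digit {b : List Char} (h : OK b) : ∀ ch ∈ b, ('0' ≤ ch && ch ≤ '9') = false := by
  intro ch hch
  cases hd : ('0' ≤ ch && ch ≤ '9') with
  | false => rfl
  | true =>
    exfalso
    obtain ⟨kv, hkv, htok⟩ := digit_has_key ch hd
    have hm := h kv hkv
    have : PySem.Chars.isIn (PySem.Int.toChars kv.2) b = false :=
      (Bool.or_eq_false_iff.mp hm).2
    rw [PySem.Chars.isIn_eq_false_iff] at this
    apply this
    obtain ⟨u, v, rfl⟩ := List.append_of_mem hch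
    rw [htok]
    exact ⟨u, v, by simp⟩

theorem OK_no_word {b : List Char} (h : OK b) : ∀ p ∈ pairsB, ¬ p.2 <:+: b := by
  intro p hp hinf
  obtain ⟨kv, hkv, h1, _⟩ := corrBA p hp
  have hm := h kv hkv
  have : PySem.Chars.isIn kv.1 b = false := (Bool.or_eq_false_iff.mp hm).1
  rw [PySem.Chars.isIn_eq_false_iff] at this
  exact this (h1 ▸ hinf)

-- ---- B skips characters on which nothing can start ----
theorem scanB_skip (g tail : List Char)
    (hd : ∀ ch ∈ g, ('0' ≤ ch && ch ≤ '9') = false)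
    (hw : ∀ t, t <:+ g → t ≠ [] → ∀ p ∈ pairsB, ¬ p.2 <+: (t ++ tail)) :
    scanB (g ++ tail) = scanB tail := by
  induction g with
  | nil => rw [List.nil_append]
  | cons x g' ih =>
    have hx : ('0' ≤ x && x ≤ '9') = false := hd x List.mem_cons_self
    have hfind : pairsB.find? (fun p => PySem.Chars.startswith (x :: (g' ++ tail)) p.2) = none := by
      rw [List.find?_eq_none]
      intro p hp hsw
      have hpre : p.2 <+: (x :: g') ++ tail := by
        rw [List.cons_append]
        exact (PySem.Chars.startswith_iff _ _).mp hsw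
      exact hw (x :: g') List.suffix_rfl (by simp) p hp hpre
    rw [List.cons_append, scanB]
    simp only [hx, Bool.false_eq_true, if_false]
    split
    · next p hsome => rw [hfind] at hsome; cases hsome
    · exact ih (fun ch h => hd ch (List.mem_cons_of_mem _ h))
        (fun t ht htn p hp => hw t (ht.trans (List.suffix_cons x g')) htn p hp)

-- ---- main equivalence of the two scans ----
-- evaluating one step of scanB on a digit
theorem scanB_cons_digit {c : Char} (rest : List Char) (hdig : ('0' ≤ c && c ≤ '9') = true) :
    scanB (c :: rest) = c :: scanB rest := by
  rw [scanB]
  simp only [hdig, if_true]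

-- evaluating one step of scanB when a word is found
theorem scanB_cons_word {p : Char × List Char} (rest : List Char) {w0 : Char} {wt : List Char}
    (hw0 : ('0' ≤ w0 && w0 ≤ '9') = false)
    (hfind : pairsB.find? (fun q => PySem.Chars.startswith (w0 :: (wt ++ rest)) q.2) = some p)
    (hdrop : (w0 :: (wt ++ rest)).drop p.2.length = rest) :
    scanB (w0 :: (wt ++ rest)) = p.1 :: scanB rest := by
  rw [scanB]
  simp only [hw0, Bool.false_eq_true, if_false]
  split
  · next q hsome =>
    rw [hfind] at hsome
    cases hsome
    rw [hdrop]
  · next hnone => rw [hfind] at hnone; cases hnone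

theorem scanA_eq_scanB (l b : List Char) (hb : OK b) :
    scanA b l = (scanB (b ++ l)).map (fun c => [c]) := by
  induction l generalizing b with
  | nil =>
    have hskip : scanB (b ++ []) = scanB [] :=
      scanB_skip b [] (OK_no_digit hb)
        (fun t ht htn p hp hpre => by
          have h1 : p.2 <+: t := by simpa using hpre
          exact OK_no_word hb p hp (h1.isInfix.trans ht.isInfix))
    rw [hskip]
    simp [scanA, scanB]
  | cons c rest ih =>
    cases hf : findA (b ++ [c]) with
    | none =>
      have hOK' : OK (b ++ [c]) := by
        intro kv hkv
        have := List.find?_eq_none.mp hf kv hkv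
        simpa using this
      rw [show scanA b (c :: rest) = scanA (b ++ [c]) rest by simp [scanA, hf],
        show b ++ c :: rest = (b ++ [c]) ++ rest by simp]
      exact ih (b ++ [c]) hOK'
    | some kv =>
      have hkv := List.mem_of_find?_eq_some hf
      have hmP : matchP (b ++ [c]) kv = true := List.find?_some hf
      have hnin1 : ¬ kv.1 <:+: b := by
        have := (Bool.or_eq_false_iff.mp (hb kv hkv)).1
        rwa [PySem.Chars.isIn_eq_false_iff] at this
      have hnin2 : ¬ PySem.Int.toChars kv.2 <:+: b := by
        have := (Bool.or_eq_false_iff.mp (hb kv hkv)).2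
        rwa [PySem.Chars.isIn_eq_false_iff] at this
      have hkne := (alphaA_ne_nil kv hkv).1
      obtain ⟨p, hp, hpw, hpt⟩ := corrAB kv hkv
      rw [show scanA b (c :: rest) = PySem.Int.toChars kv.2 :: scanA [] rest by simp [scanA, hf]]
      have htail : scanA [] rest = (scanB rest).map (fun c => [c]) := by
        simpa using ih [] OK_nil
      cases hdig : ('0' ≤ c && c ≤ '9') with
      | true =>
        -- the key that fired is the digit c itself
        have htok : PySem.Int.toChars kv.2 = [c] := by
          rcases Bool.or_eq_true_iff.mp hmP with e | e
          · exfalso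
            have hsuf : kv.1 <:+ b ++ [c] :=
              infix_snoc ((PySem.Chars.isIn_iff_infix _ _).mp e) hnin1
            have hcmem : c ∈ kv.1 := mem_last_of_suffix_snoc hsuf hkne
            have hnd := alphaA_no_digit kv hkv c hcmem
            rw [hdig] at hnd
            cases hnd
          · have hsuf : PySem.Int.toChars kv.2 <:+ b ++ [c] :=
              infix_snoc ((PySem.Chars.isIn_iff_infix _ _).mp e) hnin2
            rw [hpt] at hsuf ⊢
            have hcm : c ∈ [p.1] := mem_last_of_suffix_snoc hsuf (by simp)
            simp only [List.mem_singleton] at hcm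
            rw [hcm]
        have hskip : scanB (b ++ c :: rest) = scanB (c :: rest) :=
          scanB_skip b (c :: rest) (OK_no_digit hb)
            (fun t ht htn q hq hpre => by
              by_cases hlen : q.2.length ≤ t.length
              · have h1 : q.2 <+: t :=
                  List.prefix_of_prefix_length_le hpre (List.prefix_append t (c :: rest)) hlen
                exact OK_no_word hb q hq (h1.isInfix.trans ht.isInfix)
              · have h1 : t ++ [c] <+: t ++ c :: rest := by simp
                have h2 : t ++ [c] <+: q.2 :=
                  List.prefix_of_prefix_length_le h1 hpre (by simp; omega)
                have hcq : c ∈ q.2 := h2.subset (by simp)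
                have hnd := pairsB_no_digit q hq c hcq
                rw [hdig] at hnd
                cases hnd)
        rw [hskip, scanB_cons_digit rest hdig, List.map_cons, htok, htail]
      | false =>
        -- the key that fired is a word, a suffix of b ++ [c]
        have e : PySem.Chars.isIn kv.1 (b ++ [c]) = true := by
          rcases Bool.or_eq_true_iff.mp hmP with e | e
          · exact e
          · exfalso
            have hsuf : PySem.Int.toChars kv.2 <:+ b ++ [c] :=
              infix_snoc ((PySem.Chars.isIn_iff_infix _ _).mp e) hnin2
            rw [hpt] at hsuf
            have hcm : c ∈ [p.1] := mem_last_of_suffix_snoc hsuf (by simp)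
            simp only [List.mem_singleton] at hcm
            have hkd := pairsB_key_digit p hp
            rw [← hcm, hdig] at hkd
            cases hkd
        have hsuf : kv.1 <:+ b ++ [c] :=
          infix_snoc ((PySem.Chars.isIn_iff_infix _ _).mp e) hnin1
        obtain ⟨g, hg⟩ := hsuf
        have hk1 : 1 ≤ kv.1.length := by
          cases hk : kv.1 with
          | nil => exact absurd hk hkne
          | cons a t => simp
        have hglen : g.length ≤ b.length := by
          have hlen := congrArg List.length hg
          simp at hlen
          omega
        have hgb : g <+: b := by
          have h1 : g <+: b ++ [c] := ⟨kv.1, hg⟩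
          have h2 := prefix_dropLast h1 (by simp; omega)
          rwa [List.dropLast_concat] at h2
        have hskip : scanB (g ++ (kv.1 ++ rest)) = scanB (kv.1 ++ rest) :=
          scanB_skip g (kv.1 ++ rest)
            (fun ch h => OK_no_digit hb ch (hgb.subset h))
            (fun t ht htn q hq hpre => by
              have htsuf : t ++ kv.1 <:+ b ++ [c] := by
                obtain ⟨r, hr⟩ := ht
                rw [← hg, ← hr]
                exact ⟨r, by simp⟩
              have h1 : t ++ kv.1 <+: t ++ (kv.1 ++ rest) := by
                rw [← List.append_assoc]
                exact List.prefix_append _ _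
              have htl : 1 ≤ t.length := by
                cases htc : t with
                | nil => exact absurd htc htn
                | cons a u => simp
              rcases lt_trichotomy q.2.length (t ++ kv.1).length with hl | hl | hl
              · have h2 : q.2 <+: t ++ kv.1 :=
                  List.prefix_of_prefix_length_le hpre h1 (le_of_lt hl)
                have h3 : q.2 <+: (t ++ kv.1).dropLast := prefix_dropLast h2 hl
                have h4 : (t ++ kv.1).dropLast <:+ b := by
                  have h5 := suffix_dropLast htsuf
                  rwa [List.dropLast_concat] at h5
                exact OK_no_word hb q hq (h3.isInfix.trans h4.isInfix)
              · have h2 : q.2 <+: t ++ kv.1 :=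
                  List.prefix_of_prefix_length_le hpre h1 (le_of_eq hl)
                have h3 : q.2 = t ++ kv.1 := h2.eq_of_length hl
                have h4 : p.2 <:+: q.2 := by
                  rw [h3, hpw]
                  exact List.IsSuffix.isInfix (List.suffix_append t kv.1)
                have hpq := no_word_infix p hp q hq h4
                have hq2 : q.2 = kv.1 := by rw [← hpq, hpw]
                rw [hq2] at h3
                have h6 : kv.1.length = t.length + kv.1.length := by
                  simpa using congrArg List.length h3
                omega
              · have h2 : t ++ kv.1 <+: q.2 :=
                  List.prefix_of_prefix_length_le h1 hpre (le_of_lt hl)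
                have h4 : p.2 <:+: q.2 := by
                  rw [hpw]
                  exact (List.IsSuffix.isInfix (List.suffix_append t kv.1)).trans h2.isInfix
                have hpq := no_word_infix p hp q hq h4
                have hq2 : q.2 = kv.1 := by rw [← hpq, hpw]
                rw [hq2] at hl
                simp only [List.length_append] at hl
                omega)
        have hbrw : b ++ c :: rest = g ++ (kv.1 ++ rest) := by
          have : b ++ c :: rest = (b ++ [c]) ++ rest := by simp
          rw [this, ← hg, List.append_assoc]
        -- evaluate scanB on kv.1 ++ rest
        obtain ⟨w0, wt, hk⟩ : ∃ w0 wt, kv.1 = w0 :: wt := by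
          cases hkc : kv.1 with
          | nil => exact absurd hkc hkne
          | cons a t => exact ⟨a, t, rfl⟩
        have hw0 : ('0' ≤ w0 && w0 ≤ '9') = false :=
          pairsB_no_digit p hp w0 (by rw [hpw, hk]; exact List.mem_cons_self)
        have hfind : pairsB.find? (fun q => PySem.Chars.startswith (w0 :: (wt ++ rest)) q.2) =
            some p := by
          apply find?_eq_some_of_unique _ _ p hp
          · rw [PySem.Chars.startswith_iff, hpw, hk, ← List.cons_append]
            exact List.prefix_append _ _
          · intro q hq hsw
            rw [PySem.Chars.startswith_iff, ← List.cons_append, ← hk] at hsw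
            by_cases hl : q.2.length ≤ kv.1.length
            · have h2 : q.2 <+: kv.1 :=
                List.prefix_of_prefix_length_le hsw (List.prefix_append _ _) hl
              exact no_word_infix q hq p hp (hpw ▸ h2.isInfix)
            · have h2 : kv.1 <+: q.2 :=
                List.prefix_of_prefix_length_le (List.prefix_append _ _) hsw (by omega)
              exact (no_word_infix p hp q hq (hpw ▸ h2.isInfix)).symm
        have hdrop : (w0 :: (wt ++ rest)).drop p.2.length = rest := by
          rw [hpw, hk, ← List.cons_append, List.drop_left]
        rw [hbrw, hskip, hk, List.cons_append,
          scanB_cons_word rest hw0 hfind hdrop, List.map_cons, hpt, htail]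

-- ===== VERDICT (by name: the statement is the Claim_ definition above) =====
theorem solution_spec : Claim_equal_solution := by
  intro s _ _
  unfold Spec_solution solution solution_alt
  have h1 := foldChar_eq_scanA s.toList [] []
  have h2 := scanA_eq_scanB s.toList [] OK_nil
  simp only [List.nil_append] at h1 h2
  rw [h1, h2, PySem.Chars.join_nil_singletons]
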